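-- pv_equiv track=rewrite | github.com/SKam23/UCB-CS61A | Testing/cs61a-summer-2020-midterm/q7/q7.py | subdrama
-- ===== SOURCE A (Python) =====
-- def subdrama(hall):
--     """
--     A 'drama' is a sequence of digits of length `d` composed entirely of the digit `d`. Examples include
--         1
--         4444
--         7777777
--
--     Note that `1 <= d <= 9`; there are no 0-length dramas.
--
--     Your task is to implement the `subdrama` function, which takes in an integer `hall` and returns
--         whether `hall` contains a drama as a consecutive subinteger of its digits.
--
--     >>> subdrama(2233) # 22 counts
--     True
--     >>> subdrama(2444423) # 4444 counts
--     True
--     >>> subdrama(82223) # 22 counts even if it appears as part of 222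
--     True
--     >>> subdrama(234562) # 2...2 does not count if the 2s are not consecutive
--     False
--     >>> subdrama(1) # 1 counts
--     True
--     >>> subdrama(498729879871) # 1 counts
--     True
--     >>> subdrama(149872987987) # 1 counts
--     True
--     >>> subdrama(4445555) # no dramas in this number
--     False
--     >>> subdrama(20) # no dramas in this number
--     False
--     """
--     current_digit = hall%10
--     count = 0
--     while hall >0:
--         last = hall%10
--         if last==current_digit:
--             count += 1
--         else:
--             count = 1
--             current_digit = hall%10
--         if count==current_digit :
--             return True
--         hall = hall//10
--     return False
-- ===== SOURCE B (Python) =====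
-- def subdrama(hall):
--     # Materialize the digits (least-significant first), then brute-force
--     # search for any drama window [d]*d among consecutive digits.
--     digits = []
--     while hall > 0:
--         digits.append(hall % 10)
--         hall //= 10
--     n = len(digits)
--     return any(digits[i:i + d] == [d] * d
--                for d in range(1, 10) for i in range(n))
-- ===== Notes on version B (the rewrite author's own statement) =====
-- stated objective: alternative
-- what changed: Replaces the stateful single-pass run-length counter over hall's digits with materializing the digit list once and brute-force testing every drama pattern [d]*d against every window of the list.
import Mathlib
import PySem

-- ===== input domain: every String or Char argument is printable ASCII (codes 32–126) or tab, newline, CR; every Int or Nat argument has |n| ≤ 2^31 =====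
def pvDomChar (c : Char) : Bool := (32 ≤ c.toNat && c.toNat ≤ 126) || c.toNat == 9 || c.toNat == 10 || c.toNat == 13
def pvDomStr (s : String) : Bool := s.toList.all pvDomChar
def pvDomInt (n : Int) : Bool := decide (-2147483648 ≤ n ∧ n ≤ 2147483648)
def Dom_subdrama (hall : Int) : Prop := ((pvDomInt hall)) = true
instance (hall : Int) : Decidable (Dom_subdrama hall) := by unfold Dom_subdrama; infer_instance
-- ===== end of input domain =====

-- B replaces A's stateful run-length counter with materializing the digit list once and
-- brute-force testing every drama pattern against every window (objective: alternative).

-- termination helper for both while loops (hall becomes hall // 10 while hall > 0)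
theorem pvFloordivTenLt (hall : Int) (h : 0 < hall) :
    (PySem.Int.floordiv hall 10).toNat < hall.toNat := by
  rw [PySem.Int.floordiv_eq_ediv_of_pos (by norm_num)]
  omega

-- ===== PORT A =====
-- the while loop of A: state (hall, current_digit, count)
def subdramaLoopA (hall current_digit count : Int) : Bool :=
  if h : hall > 0 then
    let last := PySem.Int.mod hall 10
    let count' := if last = current_digit then count + 1 else 1
    let current_digit' := if last = current_digit then current_digit else PySem.Int.mod hall 10
    if count' = current_digit' then true
    else subdramaLoopA (PySem.Int.floordiv hall 10) current_digit' count'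
  else false
termination_by hall.toNat
decreasing_by exact pvFloordivTenLt hall h

def subdrama (hall : Int) : Bool :=
  subdramaLoopA hall (PySem.Int.mod hall 10) 0

-- ===== PORT B =====
-- the digit-collecting while loop of B (digits.append(hall % 10); hall //= 10)
def subdramaDigitsLoop (hall : Int) (digits : List Int) : List Int :=
  if h : hall > 0 then
    subdramaDigitsLoop (PySem.Int.floordiv hall 10) (digits ++ [PySem.Int.mod hall 10])
  else digits
termination_by hall.toNat
decreasing_by exact pvFloordivTenLt hall h

def subdrama_alt (hall : Int) : Bool :=
  let digits := subdramaDigitsLoop hall []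
  let n : Int := digits.length
  (PySem.List.pyRange 1 10 1).any fun d =>
    (PySem.List.pyRange 0 n 1).any fun i =>
      PySem.List.slice digits (some i) (some (i + d)) == List.replicate d.toNat d

-- ===== PRECONDITION & SPEC =====
def Spec_subdrama (hall : Int) (out : Bool) : Prop := out = subdrama_alt hall
instance (hall : Int) (out : Bool) : Decidable (Spec_subdrama hall out) := by unfold Spec_subdrama; infer_instance

-- ===== CLAIM (what is proved, stated in full; the proofs are below) =====
def Claim_equal_subdrama : Prop := ∀ (hall : Int), Dom_subdrama hall → Spec_subdrama hall (subdrama hall)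

-- ===== LEMMAS AND PROOFS =====

-- the digit list of hall, least-significant first
def pvDigits (hall : Int) : List Int :=
  if h : 0 < hall then PySem.Int.mod hall 10 :: pvDigits (PySem.Int.floordiv hall 10) else []
termination_by hall.toNat
decreasing_by exact pvFloordivTenLt hall h

def loopAList : List Int → Int → Int → Bool
  | [], _, _ => false
  | d :: t, c, k =>
    let k' := if d = c then k + 1 else 1
    let c' := if d = c then c else d
    if k' = c' then true else loopAList t c' k'
def pvHasWin (ds : List Int) : Prop :=
  ∃ d : ℕ, 1 ≤ d ∧ d ≤ 9 ∧ ∃ i : ℕ, (ds.drop i).take d = List.replicate d (d : Int)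

theorem loopAList_cons_eq (d : Int) (t : List Int) (c k : Int) (h : d = c) :
    loopAList (d :: t) c k = if k + 1 = c then true else loopAList t c (k + 1) := by
  subst h; simp [loopAList]

theorem loopAList_cons_ne (d : Int) (t : List Int) (c k : Int) (h : ¬ d = c) :
    loopAList (d :: t) c k = if 1 = d then true else loopAList t d 1 := by
  simp [loopAList, h]

theorem loopA_run (j : ℕ) : ∀ (ds : List Int) (c k : Int), 1 ≤ j →
    ds.take j = List.replicate j c → k + j = c → loopAList ds c k = true := by
  induction j with
  | zero => intro ds c k h; omega
  | succ j' ih =>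
    intro ds c k _ ht hs
    match ds with
    | [] => simp [List.replicate_succ] at ht
    | d :: t =>
      rw [List.take_succ_cons, List.replicate_succ, List.cons.injEq] at ht
      obtain ⟨rfl, ht'⟩ := ht
      rw [loopAList_cons_eq d t d k rfl]
      by_cases hk1 : k + 1 = d
      · rw [if_pos hk1]
      · rw [if_neg hk1]
        exact ih t d (k + 1) (by push_cast at hs ⊢; omega) ht' (by push_cast at hs ⊢; omega)

theorem loopA_sound : ∀ (ds : List Int), (∀ x ∈ ds, 0 ≤ x ∧ x < 10) → ∀ c k : Int,
    loopAList ds c k = true →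
    (∃ j : ℕ, 1 ≤ j ∧ ds.take j = List.replicate j c ∧ k + j = c) ∨ pvHasWin ds := by
  intro ds
  induction ds with
  | nil => intro _ c k h; simp [loopAList] at h
  | cons d t ih =>
    intro hb c k hrun
    by_cases hdc : d = c
    · subst hdc
      rw [loopAList_cons_eq d t d k rfl] at hrun
      by_cases hk1 : k + 1 = d
      · left; exact ⟨1, le_refl 1, by simp, by push_cast; omega⟩
      · rw [if_neg hk1] at hrun
        rcases ih (fun x hx => hb x (List.mem_cons_of_mem _ hx)) d (k + 1) hrun with ⟨j, hj, ht, hs⟩ | hwin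
        · left
          exact ⟨j + 1, by omega, by rw [List.take_succ_cons, List.replicate_succ, ht], by push_cast at hs ⊢; omega⟩
        · right
          obtain ⟨dn, h1, h9, i, hw⟩ := hwin
          exact ⟨dn, h1, h9, i + 1, by simpa using hw⟩
    · rw [loopAList_cons_ne d t c k hdc] at hrun
      by_cases hd1 : (1 : Int) = d
      · right; exact ⟨1, le_refl 1, by omega, 0, by simp [← hd1]⟩
      · rw [if_neg hd1] at hrun
        rcases ih (fun x hx => hb x (List.mem_cons_of_mem _ hx)) d 1 hrun with ⟨j, hj, ht, hs⟩ | hwin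
        · right
          have hdb := hb d (List.mem_cons_self)
          refine ⟨j + 1, by omega, by omega, 0, ?_⟩
          simp only [List.drop_zero, List.take_succ_cons, List.replicate_succ, ht]
          have hdj : d = ((j + 1 : ℕ) : ℤ) := by push_cast at hs ⊢; omega
          rw [hdj]
        · right
          obtain ⟨dn, h1, h9, i, hw⟩ := hwin
          exact ⟨dn, h1, h9, i + 1, by simpa using hw⟩

theorem loopA_complete : ∀ (ds : List Int), (∀ x ∈ ds, 0 ≤ x ∧ x < 10) → ∀ c k : Int,
    0 ≤ k → (k < c ∨ k = 0 ∨ c = 0) →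
    ((∃ j : ℕ, 1 ≤ j ∧ ds.take j = List.replicate j c ∧ k + j = c) ∨ pvHasWin ds) →
    loopAList ds c k = true := by
  intro ds
  induction ds with
  | nil =>
    rintro _ c k _ _ (⟨j, hj, ht, hs⟩ | ⟨dn, h1, h9, i, hw⟩)
    · rw [List.take_nil, eq_comm, List.replicate_eq_nil_iff] at ht; omega
    · rw [List.drop_nil, List.take_nil, eq_comm, List.replicate_eq_nil_iff] at hw; omega
  | cons d t ih =>
    rintro hb c k hk0 hkc (⟨j, hj, ht, hs⟩ | ⟨dn, h1, h9, i, hw⟩)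
    · -- a run of c of length j starts right here and completes the counter
      obtain ⟨j', rfl⟩ : ∃ j', j = j' + 1 := ⟨j - 1, by omega⟩
      rw [List.take_succ_cons, List.replicate_succ, List.cons.injEq] at ht
      obtain ⟨rfl, ht'⟩ := ht
      rw [loopAList_cons_eq d t d k rfl]
      by_cases hk1 : k + 1 = d
      · rw [if_pos hk1]
      · rw [if_neg hk1]
        exact loopA_run j' t d (k + 1) (by push_cast at hs; omega) ht' (by push_cast at hs; omega)
    · cases i with
      | succ i' =>
        -- the window lies in the tail: one loop step, then induction
        have hw' : (t.drop i').take dn = List.replicate dn (dn : Int) := by simpa using hw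
        have hbt := fun x hx => hb x (List.mem_cons_of_mem _ hx)
        have hdb := hb d (List.mem_cons_self)
        by_cases hdc : d = c
        · subst hdc
          rw [loopAList_cons_eq d t d k rfl]
          by_cases hk1 : k + 1 = d
          · rw [if_pos hk1]
          · rw [if_neg hk1]
            exact ih hbt d (k + 1) (by omega) (by omega) (Or.inr ⟨dn, h1, h9, i', hw'⟩)
        · rw [loopAList_cons_ne d t c k hdc]
          by_cases hd1 : (1 : Int) = d
          · rw [if_pos hd1]
          · rw [if_neg hd1]
            exact ih hbt d 1 (by omega) (by omega) (Or.inr ⟨dn, h1, h9, i', hw'⟩)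
      | zero =>
        -- the window starts right here
        obtain ⟨dn', rfl⟩ : ∃ dn', dn = dn' + 1 := ⟨dn - 1, by omega⟩
        rw [List.drop_zero, List.take_succ_cons, List.replicate_succ, List.cons.injEq] at hw
        obtain ⟨hd, hw'⟩ := hw
        by_cases hdc : d = c
        · -- the window digit continues the current run: the counter completes within it
          rw [loopAList_cons_eq d t c k hdc]
          by_cases hk1 : k + 1 = c
          · rw [if_pos hk1]
          · rw [if_neg hk1]
            have hc : c = ((dn' + 1 : ℕ) : ℤ) := by rw [← hdc, hd]
            have hklt : k + 1 < c := by push_cast at hc; omega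
            have hcut : (c - (k + 1)).toNat ≤ dn' := by push_cast at hc; omega
            -- run of c of length (c - (k+1)) at the head of t, cut from the window
            refine loopA_run (c - (k + 1)).toNat t c (k + 1) (by omega) ?_ (by omega)
            calc List.take (c - (k + 1)).toNat t
                = List.take (c - (k + 1)).toNat (List.take dn' t) := by
                  rw [List.take_take, min_eq_left hcut]
              _ = List.replicate (c - (k + 1)).toNat c := by
                  rw [hw', List.take_replicate, min_eq_left hcut, ← hc]
        · rw [loopAList_cons_ne d t c k hdc]
          by_cases hd1 : (1 : Int) = d
          · rw [if_pos hd1]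
          · rw [if_neg hd1]
            -- reset run: the rest of the window completes the fresh counter
            refine loopA_run dn' t d 1 (by push_cast [hd] at hd1 ⊢; omega) ?_ (by push_cast [hd] at hd1 ⊢; omega)
            rw [hw', hd]


theorem pvDigits_bounds (hall : Int) : ∀ x ∈ pvDigits hall, 0 ≤ x ∧ x < 10 := by
  fun_induction pvDigits hall with
  | case1 hall h ih =>
    intro x hx
    rcases List.mem_cons.mp hx with rfl | hx
    · exact ⟨PySem.Int.mod_nonneg _ (by norm_num), PySem.Int.mod_lt _ (by norm_num)⟩
    · exact ih x hx
  | case2 hall h => intro x hx; simp at hx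

theorem loopA_eq_list (hall c k : Int) :
    subdramaLoopA hall c k = loopAList (pvDigits hall) c k := by
  induction hall, c, k using subdramaLoopA.induct with
  | case1 hall c k h _l _k _c heq =>
    rw [subdramaLoopA, dif_pos h, pvDigits, dif_pos h, loopAList]
    have heq' : (if PySem.Int.mod hall 10 = c then k + 1 else 1) =
        (if PySem.Int.mod hall 10 = c then c else PySem.Int.mod hall 10) := heq
    rw [if_pos heq', if_pos heq']
  | case2 hall c k h _l _k _c heq ih =>
    rw [subdramaLoopA, dif_pos h, pvDigits, dif_pos h, loopAList]
    have heq' : ¬ ((if PySem.Int.mod hall 10 = c then k + 1 else 1) =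
        (if PySem.Int.mod hall 10 = c then c else PySem.Int.mod hall 10)) := heq
    rw [if_neg heq', if_neg heq']
    exact ih
  | case3 hall c k h =>
    rw [subdramaLoopA, dif_neg h, pvDigits, dif_neg (by omega : ¬ 0 < hall), loopAList]

theorem digitsLoop_eq (hall : Int) (acc : List Int) :
    subdramaDigitsLoop hall acc = acc ++ pvDigits hall := by
  fun_induction subdramaDigitsLoop hall acc with
  | case1 hall acc h ih => rw [pvDigits, dif_pos h, ih]; simp
  | case2 hall acc h => rw [pvDigits, dif_neg (by omega : ¬ 0 < hall)]; simp

theorem subdrama_iff (hall : Int) : subdrama hall = true ↔ pvHasWin (pvDigits hall) := by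
  rw [subdrama, loopA_eq_list]
  constructor
  · intro h
    rcases loopA_sound (pvDigits hall) (pvDigits_bounds hall) _ 0 h with ⟨j, hj, ht, hs⟩ | hwin
    · have hlt : PySem.Int.mod hall 10 < 10 := PySem.Int.mod_lt _ (by norm_num)
      refine ⟨j, hj, by omega, 0, ?_⟩
      rw [List.drop_zero, ht]
      have hc : PySem.Int.mod hall 10 = ((j : ℕ) : ℤ) := by omega
      rw [hc]
    · exact hwin
  · intro hwin
    exact loopA_complete _ (pvDigits_bounds hall) _ 0 le_rfl (Or.inr (Or.inl rfl)) (Or.inr hwin)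

theorem subdrama_alt_iff (hall : Int) : subdrama_alt hall = true ↔ pvHasWin (pvDigits hall) := by
  have hds : subdramaDigitsLoop hall [] = pvDigits hall := by rw [digitsLoop_eq, List.nil_append]
  simp only [subdrama_alt, hds, List.any_eq_true, PySem.List.mem_pyRange_one, beq_iff_eq]
  constructor
  · rintro ⟨d, ⟨hd1, hd10⟩, i, ⟨hi0, hin⟩, hsl⟩
    rw [PySem.List.slice_toNat _ hi0 (by omega)] at hsl
    have htn : (i + d).toNat - i.toNat = d.toNat := by omega
    rw [htn] at hsl
    refine ⟨d.toNat, by omega, by omega, i.toNat, ?_⟩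
    rw [hsl]
    congr 1
    omega
  · rintro ⟨dn, h1, h9, i, hw⟩
    have hlen : i < (pvDigits hall).length := by
      by_contra hge
      rw [List.drop_eq_nil_of_le (by omega), List.take_nil, eq_comm, List.replicate_eq_nil_iff] at hw
      omega
    refine ⟨(dn : ℤ), ⟨by exact_mod_cast h1, by omega⟩, (i : ℤ), ⟨by positivity, by exact_mod_cast hlen⟩, ?_⟩
    rw [PySem.List.slice_toNat _ (by positivity) (by positivity)]
    have h2 : ((i : ℤ) + (dn : ℤ)) = ((i + dn : ℕ) : ℤ) := by push_cast; ring
    rw [h2]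
    simp only [Int.toNat_natCast]
    have h3 : i + dn - i = dn := by omega
    rw [h3]
    exact hw

-- ===== VERDICT (by name: the statement is the Claim_ definition above) =====
theorem subdrama_spec : Claim_equal_subdrama := by
  intro hall _
  unfold Spec_subdrama
  cases ha : subdrama hall <;> cases hb : subdrama_alt hall <;> try rfl
  · exact absurd (ha ▸ (subdrama_iff hall).mpr ((subdrama_alt_iff hall).mp hb)) (by simp)
  · exact absurd (hb ▸ (subdrama_alt_iff hall).mpr ((subdrama_iff hall).mp ha)) (by simp)
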